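-- pv_equiv track=rewrite | github.com/inducer/loopy | loopy/schedule/__init__.py | get_priority_tiers
-- ===== SOURCE A (Python) =====
-- from typing import (FrozenSet, Hashable, Sequence, AbstractSet, Any, Set, TypeVar,
--                     Mapping, Dict, Tuple, Iterator, Optional, TYPE_CHECKING)
--
-- def get_priority_tiers(
--         wanted: AbstractSet[int],
--         priorities: AbstractSet[Sequence[int]]
--         ) -> Iterator[AbstractSet[int]]:
--     # Get highest priority tier candidates: These are the first inames
--     # of all the given priority constraints
--     candidates = set()
--     for prio in priorities:
--         for p in prio:
--             if p in wanted:
--                 candidates.add(p)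
--                 break
--
--     # Now shrink this set by removing those inames that are prohibited
--     # by other constraints
--     bad_candidates = []
--     for c1 in candidates:
--         for c2 in candidates:
--             for prio in priorities:
--                 try:
--                     if prio.index(c1) < prio.index(c2):
--                         bad_candidates.append(c2)
--                 except ValueError:
--                     # A ValueError in tuple.index just states that one of
--                     # the candidates is not present in the priority constraint
--                     pass
--     candidates = candidates - set(bad_candidates)
--
--     if candidates:
--         # We found a valid priority tier
--         yield candidates
--     else:
--         # If we did not, stop the generator
--         return
--
--     # Now reduce the input data for recursion
--     priorities = frozenset([tuple(i for i in prio if i not in candidates)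
--                             for prio in priorities
--                             ]) - frozenset([()])
--     wanted = wanted - candidates
--
--     # Yield recursively
--     yield from get_priority_tiers(wanted, priorities)
-- ===== SOURCE B (Python) =====
-- def get_priority_tiers(wanted, priorities):
--     while True:
--         # first wanted iname of each priority constraint
--         heads = {next((p for p in prio if p in wanted), None)
--                  for prio in priorities} - {None}
--         # keep only those heads that no other head precedes in some constraint
--         tier = {c for c in heads
--                 if not any(c1 in prio and c in prio
--                            and prio.index(c1) < prio.index(c)
--                            for c1 in heads for prio in priorities)}
--         if not tier:
--             return
--         yield tier
--         priorities = {tuple(i for i in prio if i not in tier)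
--                       for prio in priorities} - {()}
--         wanted = wanted - tier
-- ===== Notes on version B (the rewrite author's own statement) =====
-- stated objective: simpler
-- what changed: A's recursive generator with a bad_candidates triple-nested accumulation loop becomes a single while-True loop with an accumulator whose tier is computed by filtering the candidate heads with a direct short-circuiting 'no other head precedes it' any() predicate.
import Mathlib
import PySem

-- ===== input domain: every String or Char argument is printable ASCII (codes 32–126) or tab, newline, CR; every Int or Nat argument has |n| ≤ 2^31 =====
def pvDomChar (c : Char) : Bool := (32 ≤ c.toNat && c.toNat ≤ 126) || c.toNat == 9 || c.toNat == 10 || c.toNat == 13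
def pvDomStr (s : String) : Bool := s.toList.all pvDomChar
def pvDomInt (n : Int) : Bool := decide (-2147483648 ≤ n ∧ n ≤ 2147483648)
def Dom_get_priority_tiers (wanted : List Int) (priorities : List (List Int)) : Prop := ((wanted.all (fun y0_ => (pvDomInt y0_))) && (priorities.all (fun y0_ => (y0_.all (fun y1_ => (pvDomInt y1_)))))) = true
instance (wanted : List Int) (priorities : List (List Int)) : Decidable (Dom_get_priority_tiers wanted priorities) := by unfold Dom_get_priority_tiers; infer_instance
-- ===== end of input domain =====

-- B replaces A's recursive generator by a while-loop with an accumulator and replaces the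
-- bad_candidates triple-loop by a direct filter predicate over the candidate heads (objective: simpler).

-- ===== PORT A =====

-- 'prio.index(c1) < prio.index(c2)' guarded by try/except ValueError: false when either index raises
def pvBadPair (prio : List Int) (c1 c2 : Int) : Bool :=
  match PySem.List.index? prio c1, PySem.List.index? prio c2 with
  | some i1, some i2 => decide (i1 < i2)
  | _, _ => false

-- the candidates loop: for each prio, add the first element that is in wanted (loop with break)
def pvCandidatesA (wanted : List Int) (priorities : List (List Int)) : PySem.Set Int :=
  priorities.foldl (fun cands prio =>
    match prio.find? (fun p => wanted.contains p) with
    | some p => PySem.Set.add cands p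
    | none => cands) []

-- the bad_candidates triple loop
def pvBadA (cands : PySem.Set Int) (priorities : List (List Int)) : List Int :=
  cands.foldl (fun bad c1 =>
    cands.foldl (fun bad c2 =>
      priorities.foldl (fun bad prio =>
        if pvBadPair prio c1 c2 then bad ++ [c2] else bad) bad) bad) []

def get_priority_tiers_go (fuel : Nat) (wanted : List Int) (priorities : List (List Int)) : List (List Int) :=
  match fuel with
  | 0 => []
  | fuel + 1 =>
    let cands0 := pvCandidatesA wanted priorities
    let bad := pvBadA cands0 priorities
    let candidates := cands0.filter (fun c => !(bad.contains c))
    if candidates.isEmpty then []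
    else
      let priorities' := PySem.Set.diff
        (PySem.Set.ofList (priorities.map (fun prio => prio.filter (fun i => !(candidates.contains i)))))
        [([] : List Int)]
      let wanted' := PySem.Set.diff wanted candidates
      candidates :: get_priority_tiers_go fuel wanted' priorities'

def get_priority_tiers (wanted : List Int) (priorities : List (List Int)) : List (List Int) :=
  get_priority_tiers_go (wanted.length + 1) wanted priorities

-- ===== PORT B =====

def get_priority_tiers_alt_go (fuel : Nat) (wanted : List Int) (priorities : List (List Int))
    (acc : List (List Int)) : List (List Int) :=
  match fuel with
  | 0 => acc.reverse
  | fuel + 1 =>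
    -- heads: set of 'next((p for p in prio if p in wanted), None)' with None dropped
    let heads : PySem.Set Int :=
      PySem.Set.ofList (priorities.filterMap (fun prio => prio.find? (fun p => wanted.contains p)))
    -- tier: heads that no other head precedes in some priority constraint
    let tier := heads.filter (fun c =>
      !(heads.any (fun c1 => priorities.any (fun prio =>
          prio.contains c1 && prio.contains c &&
          decide ((PySem.List.index? prio c1).getD 0 < (PySem.List.index? prio c).getD 0)))))
    if tier.isEmpty then acc.reverse
    else
      let priorities' := PySem.Set.diff
        (PySem.Set.ofList (priorities.map (fun prio => prio.filter (fun i => !(tier.contains i)))))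
        [([] : List Int)]
      get_priority_tiers_alt_go fuel (PySem.Set.diff wanted tier) priorities' (tier :: acc)

def get_priority_tiers_alt (wanted : List Int) (priorities : List (List Int)) : List (List Int) :=
  get_priority_tiers_alt_go (wanted.length + 1) wanted priorities []

-- ===== PRECONDITION & SPEC =====
def Spec_get_priority_tiers (wanted : List Int) (priorities : List (List Int)) (out : List (List Int)) : Prop := out = get_priority_tiers_alt wanted priorities
instance (wanted : List Int) (priorities : List (List Int)) (out : List (List Int)) : Decidable (Spec_get_priority_tiers wanted priorities out) := by unfold Spec_get_priority_tiers; infer_instance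

-- ===== CLAIM (what is proved, stated in full; the proofs are below) =====
def Claim_equal_get_priority_tiers : Prop := ∀ (wanted : List Int) (priorities : List (List Int)), Dom_get_priority_tiers wanted priorities → Spec_get_priority_tiers wanted priorities (get_priority_tiers wanted priorities)

-- ===== LEMMAS AND PROOFS =====

-- the two candidate/heads computations agree
lemma candA_gen (wanted : List Int) (priorities : List (List Int)) (s : PySem.Set Int) :
    priorities.foldl (fun cands prio =>
      match prio.find? (fun p => wanted.contains p) with
      | some p => PySem.Set.add cands p
      | none => cands) s =
    PySem.Set.update s (priorities.filterMap (fun prio => prio.find? (fun p => wanted.contains p))) := by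
  induction priorities generalizing s with
  | nil => rfl
  | cons prio rest ih =>
    simp only [List.foldl_cons, List.filterMap_cons]
    cases h : prio.find? (fun p => wanted.contains p) with
    | none => simp only; exact ih s
    | some p => simp only; exact ih (PySem.Set.add s p)

lemma candidates_eq (wanted : List Int) (priorities : List (List Int)) :
    pvCandidatesA wanted priorities =
      PySem.Set.ofList (priorities.filterMap (fun prio => prio.find? (fun p => wanted.contains p))) := by
  rw [pvCandidatesA, candA_gen, PySem.Set.ofList_eq_foldl]
  rfl

-- A's bad list, flattened
lemma badA_eq (cands : PySem.Set Int) (priorities : List (List Int)) :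
    pvBadA cands priorities =
      cands.flatMap (fun c1 => cands.flatMap (fun c2 =>
        (priorities.filter (fun prio => pvBadPair prio c1 c2)).map (fun _ => c2))) := by
  unfold pvBadA
  simp only [PySem.List.foldl_append_if, PySem.List.foldl_append_eq_flatMap, List.nil_append]

-- A's guarded index comparison equals B's membership-guarded one
lemma badPair_eq (prio : List Int) (c1 c : Int) :
    pvBadPair prio c1 c =
      (prio.contains c1 && prio.contains c &&
        decide ((PySem.List.index? prio c1).getD 0 < (PySem.List.index? prio c).getD 0)) := by
  unfold pvBadPair
  cases h1 : PySem.List.index? prio c1 with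
  | none =>
    have hm : c1 ∉ prio := (PySem.List.index?_eq_none_iff prio c1).mp h1
    simp [hm]
  | some i1 =>
    cases h2 : PySem.List.index? prio c with
    | none =>
      have hm : c ∉ prio := (PySem.List.index?_eq_none_iff prio c).mp h2
      simp [hm]
    | some i2 =>
      have m1 : c1 ∈ prio := by
        by_contra hm
        rw [(PySem.List.index?_eq_none_iff prio c1).mpr hm] at h1
        simp at h1
      have m2 : c ∈ prio := by
        by_contra hm
        rw [(PySem.List.index?_eq_none_iff prio c).mpr hm] at h2
        simp at h2
      simp [m1, m2]

-- the tier computed by the two sides agrees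
lemma tier_eq (wanted : List Int) (priorities : List (List Int)) :
    (pvCandidatesA wanted priorities).filter
        (fun c => !((pvBadA (pvCandidatesA wanted priorities) priorities).contains c)) =
      (PySem.Set.ofList (priorities.filterMap (fun prio => prio.find? (fun p => wanted.contains p)))).filter
        (fun c => !((PySem.Set.ofList (priorities.filterMap (fun prio => prio.find? (fun p => wanted.contains p)))).any
          (fun c1 => priorities.any (fun prio =>
            prio.contains c1 && prio.contains c &&
            decide ((PySem.List.index? prio c1).getD 0 < (PySem.List.index? prio c).getD 0))))) := by
  rw [candidates_eq]
  apply List.filter_congr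
  intro c hc
  congr 1
  rw [Bool.eq_iff_iff]
  simp only [badA_eq, List.contains_eq_mem, List.mem_flatMap, List.mem_filter, List.mem_map,
    List.any_eq_true, badPair_eq, decide_eq_true_eq] at hc ⊢
  constructor
  · rintro ⟨c1, hc1, c2, -, prio, ⟨hp, hcond⟩, rfl⟩
    exact ⟨c1, hc1, prio, hp, hcond⟩
  · rintro ⟨c1, hc1, prio, hp, hcond⟩
    exact ⟨c1, hc1, c, hc, prio, ⟨hp, hcond⟩, rfl⟩

lemma go_eq (fuel : Nat) (wanted : List Int) (priorities : List (List Int)) (acc : List (List Int)) :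
    get_priority_tiers_alt_go fuel wanted priorities acc =
      acc.reverse ++ get_priority_tiers_go fuel wanted priorities := by
  induction fuel generalizing wanted priorities acc with
  | zero => simp [get_priority_tiers_go, get_priority_tiers_alt_go]
  | succ n ih =>
    rw [get_priority_tiers_go, get_priority_tiers_alt_go]
    simp only [← tier_eq wanted priorities]
    set T := (pvCandidatesA wanted priorities).filter
      (fun c => !((pvBadA (pvCandidatesA wanted priorities) priorities).contains c)) with hT
    by_cases h : T.isEmpty
    · simp [h]
    · simp only [h, if_neg, Bool.not_eq_true] at *
      simp [ih, List.reverse_cons]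

-- ===== VERDICT (by name: the statement is the Claim_ definition above) =====
theorem get_priority_tiers_spec : Claim_equal_get_priority_tiers := by
  intro wanted priorities _
  unfold Spec_get_priority_tiers get_priority_tiers get_priority_tiers_alt
  rw [go_eq]
  simp
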